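-- pv_equiv track=rewrite | github.com/Flank/gcloud_cli | google-cloud-sdk/lib/tests/lib/test_case.py | _StripLongestCommonSpaceSuffix
-- ===== SOURCE A (Python) =====
-- def _StripLongestCommonSpaceSuffix(str_a, str_b):
--   """Strips the longest common isspace() suffix from str_a and str_b.
--
--   Args:
--     str_a: The first string to strip.
--     str_b: The second string to strip.
--
--   Returns:
--     (str_a_stripped, str_b_stripped)
--       str_a_stripped: str_a with longest common isspace() suffix stripped.
--       str_b_stripped: str_b with longest common isspace() suffix stripped.
--   """
--   i = 0
--   while True:
--     try:
--       end_a = str_a[i - 1]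
--       end_b = str_b[i - 1]
--     except IndexError:
--       break
--     if end_a != end_b or not end_a.isspace():
--       break
--     i -= 1
--   if not i:
--     return str_a, str_b
--   return str_a[:i], str_b[:i]
-- ===== SOURCE B (Python) =====
-- def _StripLongestCommonSpaceSuffix(str_a, str_b):
--   """Two-pass version: common prefix of the reversed strings first,
--   then count its leading whitespace."""
--   ra, rb = str_a[::-1], str_b[::-1]
--   # pass 1: length of the longest common prefix of ra and rb
--   m = 0
--   for ca, cb in zip(ra, rb):
--     if ca != cb:
--       break
--     m += 1
--   # pass 2: leading whitespace run inside that common prefix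
--   k = 0
--   while k < m and ra[k].isspace():
--     k += 1
--   if k == 0:
--     return str_a, str_b
--   return str_a[:-k], str_b[:-k]
-- ===== Notes on version B (the rewrite author's own statement) =====
-- stated objective: alternative
-- what changed: A's single backward walk testing 'chars equal AND whitespace' at each step is split into two separate passes: compute the longest common prefix of the two reversed strings, then count the leading whitespace run inside that prefix.
import Mathlib
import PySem

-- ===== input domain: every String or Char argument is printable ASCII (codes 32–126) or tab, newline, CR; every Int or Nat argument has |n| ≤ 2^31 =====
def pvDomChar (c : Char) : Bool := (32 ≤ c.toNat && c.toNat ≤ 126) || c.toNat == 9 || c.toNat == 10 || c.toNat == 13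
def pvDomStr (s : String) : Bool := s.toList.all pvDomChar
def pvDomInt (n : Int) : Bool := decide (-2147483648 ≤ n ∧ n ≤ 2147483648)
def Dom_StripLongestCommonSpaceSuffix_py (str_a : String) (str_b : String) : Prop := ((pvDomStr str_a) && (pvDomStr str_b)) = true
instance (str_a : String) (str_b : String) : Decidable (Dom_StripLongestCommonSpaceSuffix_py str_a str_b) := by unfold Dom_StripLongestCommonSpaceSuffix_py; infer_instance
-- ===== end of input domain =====

-- B replaces A's fused backward equal-and-whitespace walk by two passes — common prefix
-- of the reversed strings, then a leading-whitespace count — objective: alternative decomposition.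

-- ===== PORT A =====
-- A's 'while True' loop: i starts at 0 and decreases; str_a[i-1]/str_b[i-1] are negative
-- indexing (PySem.List.pyGet?; none = the caught IndexError). The loop runs at most
-- min(len a, len b) ≤ len a times, so fuel = len a + 1 only makes the same loop total.
def pvLoopA : Nat → List Char → List Char → Int → Int
  | 0, _, _, i => i
  | fuel + 1, sa, sb, i =>
    match PySem.List.pyGet? sa (i - 1), PySem.List.pyGet? sb (i - 1) with
    | some ea, some eb =>
        if ea ≠ eb ∨ PySem.Chars.isspace ea = false then i
        else pvLoopA fuel sa sb (i - 1)
    | _, _ => i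

def StripLongestCommonSpaceSuffix_py (str_a : String) (str_b : String) : String × String :=
  let i := pvLoopA (str_a.toList.length + 1) str_a.toList str_b.toList 0
  if i = 0 then (str_a, str_b)
  else (PySem.Str.slice str_a none (some i), PySem.Str.slice str_b none (some i))

-- ===== PORT B =====
-- pass 1 of Source B: 'for ca, cb in zip(ra, rb): if ca != cb: break; m += 1'
def pvCpLen : List (Char × Char) → Nat
  | [] => 0
  | (ca, cb) :: t => if ca ≠ cb then 0 else pvCpLen t + 1

-- pass 2 of Source B: 'while k < m and ra[k].isspace(): k += 1'
def pvWsLen (ra : List Char) (m : Nat) (k : Nat) : Nat :=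
  if _h : k < m then
    match PySem.List.pyGet? ra (k : Int) with
    | some c => if PySem.Chars.isspace c then pvWsLen ra m (k + 1) else k
    | none => k          -- unreachable in Source B (k < m ≤ len ra); Python would raise here
  else k
termination_by m - k

def StripLongestCommonSpaceSuffix_py_alt (str_a : String) (str_b : String) : String × String :=
  let ra := str_a.toList.reverse   -- str_a[::-1] (PySem.List.slice?_none_none_neg_one)
  let rb := str_b.toList.reverse
  let m := pvCpLen (ra.zip rb)
  let k := pvWsLen ra m 0
  if k = 0 then (str_a, str_b)
  else (PySem.Str.slice str_a none (some (-(k : Int))),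
        PySem.Str.slice str_b none (some (-(k : Int))))

-- ===== PRECONDITION & SPEC =====
def Spec_StripLongestCommonSpaceSuffix_py (str_a : String) (str_b : String) (out : String × String) : Prop := out = StripLongestCommonSpaceSuffix_py_alt str_a str_b
instance (str_a : String) (str_b : String) (out : String × String) : Decidable (Spec_StripLongestCommonSpaceSuffix_py str_a str_b out) := by unfold Spec_StripLongestCommonSpaceSuffix_py; infer_instance

-- ===== CLAIM (what is proved, stated in full; the proofs are below) =====
def Claim_equal_StripLongestCommonSpaceSuffix_py : Prop := ∀ (str_a : String) (str_b : String), Dom_StripLongestCommonSpaceSuffix_py str_a str_b → Spec_StripLongestCommonSpaceSuffix_py str_a str_b (StripLongestCommonSpaceSuffix_py str_a str_b)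

-- ===== LEMMAS AND PROOFS =====

-- proof-side characterization: length of the longest prefix of equal-and-whitespace pairs
def pvFused : List Char → List Char → Nat
  | x :: xs, y :: ys => if x = y ∧ PySem.Chars.isspace x then pvFused xs ys + 1 else 0
  | _, _ => 0

-- proof-side: leading whitespace run of l, cut off at m
def pvWs2 : List Char → Nat → Nat
  | x :: xs, m + 1 => if PySem.Chars.isspace x then pvWs2 xs m + 1 else 0
  | _, _ => 0

theorem pvFused_le (xs ys : List Char) : pvFused xs ys ≤ xs.length := by
  induction xs generalizing ys with
  | nil => simp [pvFused]
  | cons x xs ih =>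
    cases ys with
    | nil => simp [pvFused]
    | cons y ys =>
      simp only [pvFused]
      split
      · exact Nat.succ_le_succ (ih ys)
      · simp

theorem pvGet_neg_rev (xs : List Char) (k : Nat) :
    PySem.List.pyGet? xs (-((k : Int) + 1)) = xs.reverse[k]? := by
  by_cases h : k < xs.length
  · have h1 : 0 < k + 1 := by omega
    have h2 : k + 1 ≤ xs.length := by omega
    have := PySem.List.pyGet?_neg_natCast (xs := xs) (k := k + 1) (by exact_mod_cast h1) (by exact_mod_cast h2)
    rw [show -((k : Int) + 1) = -(((k + 1 : Nat) : Int)) by push_cast; ring]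
    rw [this]
    rw [List.getElem?_reverse h]
    congr 1
    omega
  · rw [List.getElem?_eq_none (by simp; omega)]
    simp only [PySem.List.pyGet?, PySem.List.pyIdx?]
    split_ifs with h1 h2 <;> simp <;> omega

theorem pvDrop_eq_nil_of_get_none {α : Type} (xs : List α) (k : Nat) (h : xs[k]? = none) :
    xs.drop k = [] := by
  rw [List.getElem?_eq_none_iff] at h
  exact List.drop_eq_nil_of_le h

theorem pvLoopA_spec (fuel k : Nat) (a b : List Char)
    (hf : pvFused (a.reverse.drop k) (b.reverse.drop k) < fuel) :
    pvLoopA fuel a b (-(k : Int)) =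
      -(((k + pvFused (a.reverse.drop k) (b.reverse.drop k) : Nat) : Int)) := by
  induction fuel generalizing k with
  | zero => omega
  | succ fuel ih =>
    rw [pvLoopA]
    have hga : PySem.List.pyGet? a (-(k : Int) - 1) = a.reverse[k]? := by
      rw [show (-(k : Int) - 1) = -((k : Int) + 1) by ring]; exact pvGet_neg_rev a k
    have hgb : PySem.List.pyGet? b (-(k : Int) - 1) = b.reverse[k]? := by
      rw [show (-(k : Int) - 1) = -((k : Int) + 1) by ring]; exact pvGet_neg_rev b k
    rw [hga, hgb]
    cases ha : a.reverse[k]? with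
    | none =>
      have : a.reverse.drop k = [] := pvDrop_eq_nil_of_get_none _ _ ha
      simp only [this, pvFused]
      simp
    | some ea =>
      cases hb : b.reverse[k]? with
      | none =>
        have hbnil : b.reverse.drop k = [] := pvDrop_eq_nil_of_get_none _ _ hb
        have : pvFused (a.reverse.drop k) (b.reverse.drop k) = 0 := by
          rw [hbnil]; cases a.reverse.drop k <;> rfl
        simp only [this]
        simp
      | some eb =>
        have hka : k < a.reverse.length := by
          by_contra hc; rw [List.getElem?_eq_none (by omega)] at ha; exact absurd ha (by simp)
        have hkb : k < b.reverse.length := by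
          by_contra hc; rw [List.getElem?_eq_none (by omega)] at hb; exact absurd hb (by simp)
        have hda : a.reverse.drop k = ea :: a.reverse.drop (k + 1) := by
          rw [List.drop_eq_getElem_cons hka]
          congr
          have := List.getElem?_eq_getElem hka
          rw [ha] at this; exact (Option.some.inj this).symm
        have hdb : b.reverse.drop k = eb :: b.reverse.drop (k + 1) := by
          rw [List.drop_eq_getElem_cons hkb]
          congr
          have := List.getElem?_eq_getElem hkb
          rw [hb] at this; exact (Option.some.inj this).symm
        rw [hda, hdb] at hf ⊢
        simp only [pvFused] at hf ⊢
        by_cases hc : ea = eb ∧ PySem.Chars.isspace ea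
        · rw [if_pos hc] at hf ⊢
          rw [if_neg (by rcases hc with ⟨he, hs⟩; subst he; simp [hs])]
          have := ih (k + 1) (by omega)
          rw [show (-(k : Int) - 1) = -(((k + 1 : Nat)) : Int) by push_cast; ring]
          rw [this]
          congr 1
          push_cast; ring
        · rw [if_neg hc] at hf ⊢
          rw [if_pos]
          · simp
          · rcases Decidable.not_and_iff_or_not.mp hc with h | h
            · exact Or.inl h
            · exact Or.inr (by simpa using h)

theorem pvWsLen_spec (ra : List Char) (m k : Nat) :
    pvWsLen ra m k = k + pvWs2 (ra.drop k) (m - k) := by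
  by_cases hkm : k < m
  · rw [pvWsLen, dif_pos hkm]
    by_cases hk : k < ra.length
    · rw [PySem.List.pyGet?_natCast, List.getElem?_eq_getElem hk]
      have hda : ra.drop k = ra[k] :: ra.drop (k + 1) := List.drop_eq_getElem_cons hk
      rw [hda]
      rw [show m - k = (m - (k + 1)) + 1 by omega]
      simp only [pvWs2]
      by_cases hs : PySem.Chars.isspace ra[k]
      · rw [if_pos hs, if_pos hs]
        rw [pvWsLen_spec ra m (k + 1)]
        omega
      · rw [if_neg hs, if_neg hs]; omega
    · rw [PySem.List.pyGet?_natCast, List.getElem?_eq_none (by omega)]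
      rw [pvDrop_eq_nil_of_get_none ra k (List.getElem?_eq_none (by omega))]
      cases m - k <;> rfl
  · rw [pvWsLen, dif_neg hkm]
    rw [show m - k = 0 by omega]
    cases ra.drop k <;> rfl
termination_by m - k

theorem pvFused_eq_ws2_cp (ra rb : List Char) :
    pvFused ra rb = pvWs2 ra (pvCpLen (ra.zip rb)) := by
  induction ra generalizing rb with
  | nil => cases rb <;> rfl
  | cons x xs ih =>
    cases rb with
    | nil => rfl
    | cons y ys =>
      by_cases hxy : x = y
      · subst hxy
        simp only [List.zip_cons_cons, pvCpLen, if_neg (show ¬(x ≠ x) by simp), pvFused, pvWs2]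
        by_cases hs : PySem.Chars.isspace x
        · simp [hs, ih ys]
        · simp [hs]
      · simp [pvFused, pvCpLen, pvWs2, hxy]

-- ===== VERDICT (by name: the statement is the Claim_ definition above) =====
theorem StripLongestCommonSpaceSuffix_py_spec : Claim_equal_StripLongestCommonSpaceSuffix_py := by
  intro str_a str_b _
  unfold Spec_StripLongestCommonSpaceSuffix_py
  simp only [StripLongestCommonSpaceSuffix_py, StripLongestCommonSpaceSuffix_py_alt]
  have hfuel : pvFused (str_a.toList.reverse.drop 0) (str_b.toList.reverse.drop 0)
      < str_a.toList.length + 1 := by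
    have := pvFused_le (str_a.toList.reverse.drop 0) (str_b.toList.reverse.drop 0)
    simp at this ⊢
    omega
  have hA := pvLoopA_spec (str_a.toList.length + 1) 0 str_a.toList str_b.toList hfuel
  simp only [Nat.cast_zero] at hA
  rw [show (-(0 : Int)) = 0 by ring] at hA
  have hB : pvWsLen str_a.toList.reverse
      (pvCpLen (str_a.toList.reverse.zip str_b.toList.reverse)) 0
      = pvFused (str_a.toList.reverse.drop 0) (str_b.toList.reverse.drop 0) := by
    rw [pvWsLen_spec]
    simp [pvFused_eq_ws2_cp]
  simp only [List.drop_zero, Nat.zero_add] at hA hB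
  rw [hA, hB]
  by_cases h0 : pvFused str_a.toList.reverse str_b.toList.reverse = 0
  · simp [h0]
  · rw [if_neg (by omega : ¬(-(↑(pvFused str_a.toList.reverse str_b.toList.reverse) : Int) = 0)),
        if_neg h0]
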